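-- pv_equiv track=rewrite | github.com/Shubham1101/Ciphers | PRINCE.py | M0
-- ===== SOURCE A (Python) =====
-- m0 = [2184,16452,8706,4368,34944,1092,8226,4353,34824,17472,546,4113,32904,17412,8736,273]
--
-- def M0(state):
-- 	ans = 0
-- 	for i in range(16):
-- 		buff = state & m0[i]
-- 		temp = 0
-- 		for j in range(16):
-- 			temp = temp ^ ((buff >> j) & 1)
-- 		ans = (ans << 1) + temp
-- 	return ans
-- ===== SOURCE B (Python) =====
-- m0 = [2184,16452,8706,4368,34944,1092,8226,4353,34824,17472,546,4113,32904,17412,8736,273]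
--
-- # Transposed GF(2) matrix: bit (15-i) of _COL[j] is bit j of m0[i].
-- _COL = [0] * 16
-- for _i in range(16):
--     for _j in range(16):
--         if (m0[_i] >> _j) & 1:
--             _COL[_j] |= 1 << (15 - _i)
--
-- def M0(state):
--     ans = 0
--     for j in range(16):
--         if (state >> j) & 1:
--             ans ^= _COL[j]
--     return ans
-- ===== Notes on version B (the rewrite author's own statement) =====
-- stated objective: alternative
-- what changed: Replaces the nested row-parity double loop (one masked-parity scan per output bit) with a precomputed transposed column table: a single loop over the input's bits XOR-accumulates whole column masks.
import Mathlib
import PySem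

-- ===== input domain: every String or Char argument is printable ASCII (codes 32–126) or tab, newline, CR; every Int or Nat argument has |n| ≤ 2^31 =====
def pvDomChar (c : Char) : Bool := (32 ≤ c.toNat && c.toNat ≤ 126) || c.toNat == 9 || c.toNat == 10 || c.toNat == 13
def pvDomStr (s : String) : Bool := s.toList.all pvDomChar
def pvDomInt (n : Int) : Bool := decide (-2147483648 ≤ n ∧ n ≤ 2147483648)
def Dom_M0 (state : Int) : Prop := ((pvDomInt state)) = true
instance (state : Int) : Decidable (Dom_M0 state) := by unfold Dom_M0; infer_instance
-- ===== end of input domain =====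

-- B replaces the nested row-parity double loop by a precomputed transposed column
-- table XOR-accumulated over the input's set bits (same result, one loop instead of two).

-- ===== PORT A =====
-- module-level constant m0
def m0List : List Int := [2184,16452,8706,4368,34944,1092,8226,4353,34824,17472,546,4113,32904,17412,8736,273]

def M0 (state : Int) : Int :=
  (List.range 16).foldl (fun ans i =>
    let buff := PySem.Int.band state (m0List.getD i 0)
    let temp := (List.range 16).foldl (fun temp (j : Nat) =>
      PySem.Int.bxor temp (PySem.Int.band (buff >>> j) 1)) 0
    (ans <<< (1:Nat)) + temp) 0

-- ===== PORT B =====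
-- module-level table build of Source B: _COL[j] collects bit (15-i) for each set bit j of m0[i]
def colM0 : List Int :=
  (List.range 16).foldl (fun col i =>
    (List.range 16).foldl (fun (col : List Int) (j : Nat) =>
      if PySem.Int.band (m0List.getD i 0 >>> j) 1 ≠ 0 then
        col.set j (PySem.Int.bor (col.getD j 0) ((1:Int) <<< (15 - i)))
      else col) col)
    (List.replicate 16 0)

def M0_alt (state : Int) : Int :=
  (List.range 16).foldl (fun ans (j : Nat) =>
    if PySem.Int.band (state >>> j) 1 ≠ 0 then PySem.Int.bxor ans (colM0.getD j 0) else ans) 0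

-- ===== PRECONDITION & SPEC =====
def Spec_M0 (state : Int) (out : Int) : Prop := out = M0_alt state
instance (state : Int) (out : Int) : Decidable (Spec_M0 state out) := by unfold Spec_M0; infer_instance

-- ===== CLAIM (what is proved, stated in full; the proofs are below) =====
def Claim_equal_M0 : Prop := ∀ (state : Int), Dom_M0 state → Spec_M0 state (M0 state)

-- ===== LEMMAS AND PROOFS =====

/-- 0/1-valued indicator used to track single bits as `Int`s. -/
def gB (b : Bool) : Int := if b then 1 else 0

/-- `m0` as a list of `Nat` masks (proof-layer mirror of `m0List`). -/
def cList : List Nat := [2184,16452,8706,4368,34944,1092,8226,4353,34824,17472,546,4113,32904,17412,8736,273]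

theorem gB_xor (u v : Bool) : PySem.Int.bxor (gB u) (gB v) = gB (xor u v) := by
  cases u <;> cases v <;> decide

theorem gBxor_left0 (v : Bool) : PySem.Int.bxor 0 (gB v) = gB v := by
  cases v <;> decide

theorem testBit0_eq (z : Nat) : z.testBit 0 = decide (z % 2 = 1) := by
  rcases Nat.mod_two_eq_zero_or_one z with hz | hz
  · cases hzz : z.testBit 0 with
    | false => simp [hz]
    | true => exact absurd (Nat.mod_two_eq_one_iff_testBit_zero.mpr hzz) (by omega)
  · simp [hz, Nat.mod_two_eq_one_iff_testBit_zero.mp hz]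

/-- If `y`'s bits are a subset of `x`'s, subtraction is xor. -/
theorem sub_eq_xor_of_and_eq (x : Nat) : ∀ y, x &&& y = y → x - y = x ^^^ y := by
  induction x using Nat.strongRecOn with
  | ind x IH =>
    intro y h
    rcases Nat.eq_zero_or_pos x with hx | hx
    · subst hx; simp_all
    · have hlt : x / 2 < x := Nat.div_lt_self hx (by omega)
      have h2 : x / 2 &&& y / 2 = y / 2 := by rw [← Nat.and_div_two, h]
      have ih := IH (x/2) hlt (y/2) h2
      have hylex : y ≤ x := h ▸ Nat.and_le_left
      have hy2 : y / 2 ≤ x / 2 := Nat.div_le_div_right hylex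
      have hxorh : (x ^^^ y) / 2 = x / 2 ^^^ y / 2 := Nat.xor_div_two
      have hpy : y % 2 = 1 → x % 2 = 1 := by
        intro hy1
        have hb : y.testBit 0 = (x.testBit 0 && y.testBit 0) := by
          conv_lhs => rw [← h, Nat.testBit_and]
        rw [testBit0_eq, testBit0_eq] at hb
        simp [hy1] at hb
        rcases Nat.mod_two_eq_zero_or_one x with hx0 | hx0
        · rw [hx0] at hb; simp at hb
        · exact hx0
      have hxorp : (x ^^^ y).testBit 0 = (x.testBit 0 ^^ y.testBit 0) := Nat.testBit_xor ..
      rw [testBit0_eq, testBit0_eq, testBit0_eq] at hxorp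
      obtain ⟨v, hv⟩ : ∃ v, x / 2 ^^^ y / 2 = v := ⟨_, rfl⟩
      obtain ⟨u, hu⟩ : ∃ u, x ^^^ y = u := ⟨_, rfl⟩
      rw [hv] at ih hxorh
      rw [hu] at hxorh hxorp ⊢
      have hxoreq := Nat.div_add_mod u 2
      have hu2 := Nat.mod_two_eq_zero_or_one u
      rcases Nat.mod_two_eq_zero_or_one x with hx0 | hx0 <;>
        rcases Nat.mod_two_eq_zero_or_one y with hy0 | hy0
      · simp [hx0, hy0] at hxorp; omega
      · exact absurd (hpy hy0) (by omega)
      · simp [hx0, hy0] at hxorp; omega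
      · simp [hx0, hy0] at hxorp; omega

/-- bit extraction `(a >> j) & 1` as an indicator of `Int.testBit`. -/
theorem bandOneShift (a : Int) (j : Nat) :
    PySem.Int.band (a >>> j) 1 = gB (a.testBit j) := by
  have hnat : ∀ (k : Nat), PySem.Int.band ((k:Int)) 1 = gB (k.testBit 0) := by
    intro k
    have h := PySem.Int.band_natCast k 1
    rw [show ((1:Nat):Int) = (1:Int) from rfl] at h
    rw [h, Nat.and_one_is_mod, testBit0_eq]
    rcases Nat.mod_two_eq_zero_or_one k with hk | hk <;> simp [hk, gB]
  cases a with
  | ofNat m =>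
    rw [show (Int.ofNat m >>> j) = ((m >>> j : Nat) : Int) from rfl, hnat,
        Nat.testBit_shiftRight]
    rfl
  | negSucc m =>
    rw [show (Int.negSucc m >>> j) = Int.negSucc (m >>> j) from rfl]
    have h2 : PySem.Int.band (Int.negSucc (m >>> j)) 1
        = ((1 - (1 &&& (m >>> j)) : Nat) : Int) := by
      unfold PySem.Int.band
      rw [if_neg (Int.not_le.mpr (Int.negSucc_lt_zero _)), if_pos (by norm_num)]
      rw [show (-Int.negSucc (m >>> j) - 1) = ((m >>> j : Nat) : Int) from
        (by rw [Int.negSucc_eq]; ring), Int.toNat_natCast]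
      rfl
    rw [h2, Nat.one_and_eq_mod_two]
    rw [show (Int.negSucc m).testBit j = !(m.testBit j) from rfl]
    rw [show m.testBit j = (m >>> j).testBit 0 from
      (by simpa using (Nat.testBit_shiftRight (i := j) (j := 0) m).symm)]
    rw [testBit0_eq]
    rcases Nat.mod_two_eq_zero_or_one (m >>> j) with hk | hk <;> simp [hk, gB]

theorem boolAbsorb (p q : Bool) : (p ^^ (p && q)) = (p && !q) := by
  cases p <;> cases q <;> rfl

/-- A-side term: `((a & c) >> j) & 1` as an indicator. -/
theorem bandRow (c : Nat) (a : Int) (j : Nat) :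
    PySem.Int.band ((PySem.Int.band a ((c:Nat):Int)) >>> j) 1
      = gB (c.testBit j && a.testBit j) := by
  cases a with
  | ofNat s =>
    rw [show (Int.ofNat s) = ((s:Nat):Int) from rfl, PySem.Int.band_natCast, bandOneShift]
    rw [show ((s &&& c : Nat) : Int).testBit j = (s &&& c).testBit j from rfl,
      Nat.testBit_and, Bool.and_comm]
    rfl
  | negSucc m =>
    have h1 : PySem.Int.band (Int.negSucc m) ((c:Nat):Int)
        = ((c - (c &&& m) : Nat) : Int) := by
      unfold PySem.Int.band
      rw [if_neg (Int.not_le.mpr (Int.negSucc_lt_zero _)), if_pos (Int.natCast_nonneg c)]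
      rw [show (-Int.negSucc m - 1) = ((m : Nat) : Int) from
        (by rw [Int.negSucc_eq]; ring), Int.toNat_natCast, Int.toNat_natCast]
    rw [h1, bandOneShift]
    have hsub : c &&& (c &&& m) = c &&& m := by
      rw [← Nat.and_assoc, Nat.and_self]
    rw [show ((c - (c &&& m) : Nat) : Int).testBit j = (c - (c &&& m)).testBit j from rfl,
      sub_eq_xor_of_and_eq c (c &&& m) hsub, Nat.testBit_xor, Nat.testBit_and, boolAbsorb]
    rfl

-- bit-list representation of a nonnegative integer, least significant bit first
def nbits : List Bool → Nat := fun l => l.foldr (fun b acc => b.toNat + 2*acc) 0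
def obits : List Bool → Int := fun l => ((nbits l : Nat) : Int)

theorem gB_eq_cast (b : Bool) : gB b = ((b.toNat : Nat) : Int) := by cases b <;> rfl

theorem obits_cons (b : Bool) (r : List Bool) : obits (b :: r) = gB b + 2 * obits r := by
  show ((b.toNat + 2 * nbits r : Nat) : Int) = gB b + 2 * ((nbits r : Nat) : Int)
  rw [gB_eq_cast]; push_cast; ring

theorem xl_cons (b c : Bool) (n m : Nat) :
    (b.toNat + 2*n) ^^^ (c.toNat + 2*m) = (xor b c).toNat + 2*(n ^^^ m) := by
  obtain ⟨v, hv⟩ : ∃ v, n ^^^ m = v := ⟨_, rfl⟩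
  obtain ⟨X, hX⟩ : ∃ X, (b.toNat + 2*n) ^^^ (c.toNat + 2*m) = X := ⟨_, rfl⟩
  have hdiv : X / 2 = v := by
    rw [← hX, ← hv, Nat.xor_div_two]
    congr 1 <;> cases b <;> cases c <;>
      simp only [Bool.toNat_false, Bool.toNat_true] <;> omega
  have hp : X.testBit 0 = ((b.toNat + 2*n).testBit 0 ^^ (c.toNat + 2*m).testBit 0) := by
    rw [← hX]; exact Nat.testBit_xor ..
  rw [testBit0_eq, testBit0_eq, testBit0_eq] at hp
  have e1 : (b.toNat + 2*n) % 2 = b.toNat := by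
    cases b <;> simp only [Bool.toNat_false, Bool.toNat_true] <;> omega
  have e2 : (c.toNat + 2*m) % 2 = c.toNat := by
    cases c <;> simp only [Bool.toNat_false, Bool.toNat_true] <;> omega
  rw [e1, e2] at hp
  rw [hX, hv]
  have hdm := Nat.div_add_mod X 2
  cases b <;> cases c <;> simp at hp ⊢ <;> omega

theorem nbits_xor {α : Type} (l : List α) (g1 g2 : α → Bool) :
    nbits (l.map g1) ^^^ nbits (l.map g2) = nbits (l.map fun x => xor (g1 x) (g2 x)) := by
  induction l with
  | nil => simp [nbits]
  | cons x xs ih =>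
    simp only [List.map_cons, nbits, List.foldr_cons]
    have h := xl_cons (g1 x) (g2 x) (nbits (xs.map g1)) (nbits (xs.map g2))
    simp only [nbits] at h ih
    rw [h, ih]

theorem obits_xor {α : Type} (l : List α) (g1 g2 : α → Bool) :
    PySem.Int.bxor (obits (l.map g1)) (obits (l.map g2))
      = obits (l.map fun x => xor (g1 x) (g2 x)) := by
  simp only [obits]
  rw [PySem.Int.bxor_natCast, nbits_xor]

theorem obits_false {α : Type} (l : List α) : obits (l.map fun _ => false) = 0 := by
  induction l with
  | nil => rfl
  | cons x xs ih => rw [List.map_cons, obits_cons, ih]; simp [gB]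

/-- B-side loop invariant: xor-accumulating column masks builds the bit list pointwise. -/
theorem bFold (f : Nat → Bool) (col : Nat → Int) (cb : Nat → Nat → Bool) (l : List Nat) :
    ∀ (js : List Nat) (p : Nat → Bool),
      (∀ j ∈ js, col j = obits (l.map (cb j))) →
      js.foldl (fun acc j => if f j then PySem.Int.bxor acc (col j) else acc) (obits (l.map p))
        = obits (l.map (fun k => js.foldl (fun u j => xor u (cb j k && f j)) (p k))) := by
  intro js
  induction js with
  | nil => intro p _; rfl
  | cons j js ih =>
    intro p hcol
    simp only [List.foldl_cons]
    cases hf : f j with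
    | false =>
      rw [if_neg (by simp [hf])]
      rw [ih p (fun x hx => hcol x (List.mem_cons_of_mem _ hx))]
      simp [hf]
    | true =>
      rw [if_pos (by simp [hf]), hcol j (List.mem_cons_self ..), obits_xor]
      rw [ih (fun k => xor (p k) (cb j k)) (fun x hx => hcol x (List.mem_cons_of_mem _ hx))]
      simp [hf]

-- ===== VERDICT (by name: the statement is the Claim_ definition above) =====
set_option maxRecDepth 100000 in
theorem M0_spec : Claim_equal_M0 := by
  intro state _
  unfold Spec_M0 M0 M0_alt
  have hbody : (fun (ans : Int) (j : Nat) =>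
      if PySem.Int.band (state >>> j) 1 ≠ 0 then PySem.Int.bxor ans (colM0.getD j 0) else ans)
      = (fun (ans : Int) (j : Nat) =>
      if state.testBit j then PySem.Int.bxor ans (colM0.getD j 0) else ans) := by
    funext ans j
    rw [bandOneShift]
    cases h : state.testBit j <;> simp [gB]
  have hBB := bFold (fun j => state.testBit j) (fun j => colM0.getD j 0)
    (fun j k => Nat.testBit (cList.getD (15 - k) 0) j) (List.range 16) (List.range 16)
    (fun _ => false) (by decide)
  rw [obits_false] at hBB
  conv_rhs => rw [hbody, hBB]
  have r0 : ∀ j : Nat, PySem.Int.band (PySem.Int.band state 2184 >>> j) 1 = gB (Nat.testBit 2184 j && state.testBit j) := fun j => bandRow 2184 state j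
  have r1 : ∀ j : Nat, PySem.Int.band (PySem.Int.band state 16452 >>> j) 1 = gB (Nat.testBit 16452 j && state.testBit j) := fun j => bandRow 16452 state j
  have r2 : ∀ j : Nat, PySem.Int.band (PySem.Int.band state 8706 >>> j) 1 = gB (Nat.testBit 8706 j && state.testBit j) := fun j => bandRow 8706 state j
  have r3 : ∀ j : Nat, PySem.Int.band (PySem.Int.band state 4368 >>> j) 1 = gB (Nat.testBit 4368 j && state.testBit j) := fun j => bandRow 4368 state j
  have r4 : ∀ j : Nat, PySem.Int.band (PySem.Int.band state 34944 >>> j) 1 = gB (Nat.testBit 34944 j && state.testBit j) := fun j => bandRow 34944 state j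
  have r5 : ∀ j : Nat, PySem.Int.band (PySem.Int.band state 1092 >>> j) 1 = gB (Nat.testBit 1092 j && state.testBit j) := fun j => bandRow 1092 state j
  have r6 : ∀ j : Nat, PySem.Int.band (PySem.Int.band state 8226 >>> j) 1 = gB (Nat.testBit 8226 j && state.testBit j) := fun j => bandRow 8226 state j
  have r7 : ∀ j : Nat, PySem.Int.band (PySem.Int.band state 4353 >>> j) 1 = gB (Nat.testBit 4353 j && state.testBit j) := fun j => bandRow 4353 state j
  have r8 : ∀ j : Nat, PySem.Int.band (PySem.Int.band state 34824 >>> j) 1 = gB (Nat.testBit 34824 j && state.testBit j) := fun j => bandRow 34824 state j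
  have r9 : ∀ j : Nat, PySem.Int.band (PySem.Int.band state 17472 >>> j) 1 = gB (Nat.testBit 17472 j && state.testBit j) := fun j => bandRow 17472 state j
  have r10 : ∀ j : Nat, PySem.Int.band (PySem.Int.band state 546 >>> j) 1 = gB (Nat.testBit 546 j && state.testBit j) := fun j => bandRow 546 state j
  have r11 : ∀ j : Nat, PySem.Int.band (PySem.Int.band state 4113 >>> j) 1 = gB (Nat.testBit 4113 j && state.testBit j) := fun j => bandRow 4113 state j
  have r12 : ∀ j : Nat, PySem.Int.band (PySem.Int.band state 32904 >>> j) 1 = gB (Nat.testBit 32904 j && state.testBit j) := fun j => bandRow 32904 state j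
  have r13 : ∀ j : Nat, PySem.Int.band (PySem.Int.band state 17412 >>> j) 1 = gB (Nat.testBit 17412 j && state.testBit j) := fun j => bandRow 17412 state j
  have r14 : ∀ j : Nat, PySem.Int.band (PySem.Int.band state 8736 >>> j) 1 = gB (Nat.testBit 8736 j && state.testBit j) := fun j => bandRow 8736 state j
  have r15 : ∀ j : Nat, PySem.Int.band (PySem.Int.band state 273 >>> j) 1 = gB (Nat.testBit 273 j && state.testBit j) := fun j => bandRow 273 state j
  simp only [show List.range 16 = [0,1,2,3,4,5,6,7,8,9,10,11,12,13,14,15] from rfl,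
    List.map_cons, List.map_nil, List.foldl_cons, List.foldl_nil,
    show m0List.getD 0 0 = 2184 from rfl,
    show m0List.getD 1 0 = 16452 from rfl,
    show m0List.getD 2 0 = 8706 from rfl,
    show m0List.getD 3 0 = 4368 from rfl,
    show m0List.getD 4 0 = 34944 from rfl,
    show m0List.getD 5 0 = 1092 from rfl,
    show m0List.getD 6 0 = 8226 from rfl,
    show m0List.getD 7 0 = 4353 from rfl,
    show m0List.getD 8 0 = 34824 from rfl,
    show m0List.getD 9 0 = 17472 from rfl,
    show m0List.getD 10 0 = 546 from rfl,
    show m0List.getD 11 0 = 4113 from rfl,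
    show m0List.getD 12 0 = 32904 from rfl,
    show m0List.getD 13 0 = 17412 from rfl,
    show m0List.getD 14 0 = 8736 from rfl,
    show m0List.getD 15 0 = 273 from rfl,
    show cList.getD 0 0 = 2184 from rfl,
    show cList.getD 1 0 = 16452 from rfl,
    show cList.getD 2 0 = 8706 from rfl,
    show cList.getD 3 0 = 4368 from rfl,
    show cList.getD 4 0 = 34944 from rfl,
    show cList.getD 5 0 = 1092 from rfl,
    show cList.getD 6 0 = 8226 from rfl,
    show cList.getD 7 0 = 4353 from rfl,
    show cList.getD 8 0 = 34824 from rfl,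
    show cList.getD 9 0 = 17472 from rfl,
    show cList.getD 10 0 = 546 from rfl,
    show cList.getD 11 0 = 4113 from rfl,
    show cList.getD 12 0 = 32904 from rfl,
    show cList.getD 13 0 = 17412 from rfl,
    show cList.getD 14 0 = 8736 from rfl,
    show cList.getD 15 0 = 273 from rfl,
    Nat.reduceSub]
  simp only [r0, r1, r2, r3, r4, r5, r6, r7, r8, r9, r10, r11, r12, r13, r14, r15]
  simp only [gBxor_left0, gB_xor, Bool.false_xor]
  simp only [obits_cons, show obits ([] : List Bool) = 0 from rfl,
    Int.shiftLeft_eq, pow_one]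
  ring
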